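-- pv_equiv track=rewrite | github.com/rickythedeveloper/autonomous-emergency-vehicle-overtake | src/algorithms/continuous/PDFs/NewPDFs.py | sweep_angles
-- ===== SOURCE A (Python) =====
-- def sweep_angles(precision, distances, angles):
-- 	current_angle = 0
-- 	sweeping_angles_list = []
-- 	tot_distances_list = []
-- 	while current_angle < 360:
-- 		tot_distances = 0
-- 		i = 0
-- 		for item in angles:
-- 			if current_angle <= item < current_angle + precision:
-- 				tot_distances = tot_distances + distances[i]
-- 			i = i + 1
-- 		tot_distances_list.append(tot_distances)
-- 		sweeping_angles_list.append(current_angle + precision)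
-- 		current_angle = current_angle + precision
-- 	return tot_distances_list, sweeping_angles_list
-- ===== SOURCE B (Python) =====
-- def sweep_angles(precision, distances, angles):
--     n_buckets = -(-360 // precision)
--     sums = [0] * n_buckets
--     for d, a in zip(distances, angles):
--         if a >= 0:
--             b = a // precision
--             if b < n_buckets:
--                 sums[b] += d
--     boundaries = [precision * (k + 1) for k in range(n_buckets)]
--     return sums, boundaries
-- ===== Notes on version B (the rewrite author's own statement) =====
-- stated objective: alternative
-- what changed: Instead of re-scanning the whole angle list once per precision-wide bucket, B makes a single pass over zip(distances, angles), computing each angle's bucket index by integer division and accumulating into a preallocated sums array, then emits the bucket boundaries by a closed-form range.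
import Mathlib
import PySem

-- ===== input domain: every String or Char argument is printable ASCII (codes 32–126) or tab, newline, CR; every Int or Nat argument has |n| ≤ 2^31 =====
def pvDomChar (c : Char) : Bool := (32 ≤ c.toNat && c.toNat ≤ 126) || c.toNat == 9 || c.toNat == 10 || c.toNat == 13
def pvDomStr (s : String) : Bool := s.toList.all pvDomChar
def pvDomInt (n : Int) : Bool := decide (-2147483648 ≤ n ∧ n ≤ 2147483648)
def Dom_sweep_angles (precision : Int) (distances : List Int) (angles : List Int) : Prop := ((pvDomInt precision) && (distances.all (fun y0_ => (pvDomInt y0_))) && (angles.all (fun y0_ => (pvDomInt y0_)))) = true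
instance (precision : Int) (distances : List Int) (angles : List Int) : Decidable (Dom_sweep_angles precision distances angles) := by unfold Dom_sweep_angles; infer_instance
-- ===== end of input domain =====

-- B changes the algorithm: one pass over zip(distances, angles) bucketing each angle by
-- integer division, instead of one full scan of all angles per bucket.

-- ===== PORT A =====

-- the inner 'for item in angles' loop: state (tot_distances, i)
def sweepInner (precision : Int) (distances : List Int) (angles : List Int) (cur : Int) : Int × Int :=
  angles.foldl
    (fun s item =>
      (if cur ≤ item ∧ item < cur + precision
         then s.1 + PySem.List.pyGetD distances s.2 0
         else s.1,
       s.2 + 1))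
    (0, (0 : Int))

-- the outer 'while current_angle < 360' loop; the 0 < precision guard only makes the
-- recursion total (the Python loop never terminates for precision ≤ 0, excluded by Pre_)
def sweepLoop (precision : Int) (distances : List Int) (angles : List Int)
    (cur : Int) (tds sas : List Int) : List Int × List Int :=
  if h : 0 < precision ∧ cur < 360 then
    sweepLoop precision distances angles (cur + precision)
      (tds ++ [(sweepInner precision distances angles cur).1])
      (sas ++ [cur + precision])
  else (tds, sas)
termination_by (360 - cur).toNat
decreasing_by omega

def sweep_angles (precision : Int) (distances : List Int) (angles : List Int) : List Int × List Int :=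
  sweepLoop precision distances angles 0 [] []

-- ===== PORT B =====

-- the single 'for d, a in zip(distances, angles)' pass of Source B
def altFold (precision nb : Int) (pairs : List (Int × Int)) (sums : List Int) : List Int :=
  pairs.foldl
    (fun sums da =>
      if 0 ≤ da.2 then
        if PySem.Int.floordiv da.2 precision < nb then
          PySem.List.pySetD sums (PySem.Int.floordiv da.2 precision)
            (PySem.List.pyGetD sums (PySem.Int.floordiv da.2 precision) 0 + da.1)
        else sums
      else sums)
    sums

def sweep_angles_alt (precision : Int) (distances : List Int) (angles : List Int) : List Int × List Int :=
  let nb : Int := -(PySem.Int.floordiv (-360) precision)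
  let sums := altFold precision nb (distances.zip angles) (List.replicate nb.toNat 0)
  (sums, (List.range nb.toNat).map (fun (k : Nat) => precision * ((k : Int) + 1)))

-- ===== PRECONDITION & SPEC =====
-- Pre_ excludes exactly the inputs where Python A does not return: precision ≤ 0 (the while
-- loop never terminates) and an angle inside [0, B*precision) whose index is ≥ len(distances)
-- (IndexError on distances[i]).
def Pre_sweep_angles (precision : Int) (distances : List Int) (angles : List Int) : Prop :=
  0 < precision ∧
    ∀ i : Nat, i < angles.length →
      (0 ≤ angles.getD i 0 ∧ angles.getD i 0 < precision * (-(PySem.Int.floordiv (-360) precision))) →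
      i < distances.length

instance (precision : Int) (distances : List Int) (angles : List Int) : Decidable (Pre_sweep_angles precision distances angles) := by
  unfold Pre_sweep_angles; infer_instance

def pvWitness_sweep_angles : Int × List Int × List Int := (90, ([1, 2, 3], [10, 100, 370]))

def Spec_sweep_angles (precision : Int) (distances : List Int) (angles : List Int) (out : List Int × List Int) : Prop := out = sweep_angles_alt precision distances angles
instance (precision : Int) (distances : List Int) (angles : List Int) (out : List Int × List Int) : Decidable (Spec_sweep_angles precision distances angles out) := by unfold Spec_sweep_angles; infer_instance

-- ===== CLAIM (what is proved, stated in full; the proofs are below) =====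
def Claim_equal_sweep_angles : Prop := ∀ (precision : Int) (distances : List Int) (angles : List Int), Dom_sweep_angles precision distances angles → Pre_sweep_angles precision distances angles → Spec_sweep_angles precision distances angles (sweep_angles precision distances angles)

-- ===== LEMMAS AND PROOFS =====

def bsum (p cur : Int) : List (Int × Int) → Int
  | [] => 0
  | (d, a) :: t => (if cur ≤ a ∧ a < cur + p then d else 0) + bsum p cur t

theorem inner_aux (p cur : Int) (ds : List Int) :
    ∀ (as : List Int) (i : Nat) (t : Int),
      (as.foldl (fun s item =>
          (if cur ≤ item ∧ item < cur + p then s.1 + PySem.List.pyGetD ds s.2 0 else s.1,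
           s.2 + 1)) (t, (i : Int))).1
        = t + bsum p cur ((ds.drop i).zip as)
  | [], i, t => by simp [bsum]
  | a :: as, i, t => by
      simp only [List.foldl_cons]
      have hcast : ((i : Int) + 1) = ((i + 1 : Nat) : Int) := by push_cast; ring
      rw [hcast, inner_aux p cur ds as (i + 1)]
      cases hd : ds.drop i with
      | nil =>
          have hlen : ds.length ≤ i := List.drop_eq_nil_iff.mp hd
          have h1 : ds.drop (i + 1) = [] := List.drop_eq_nil_iff.mpr (by omega)
          have hget : PySem.List.pyGetD ds (i : Int) 0 = 0 := by
            simp [PySem.List.pyGetD_natCast, List.getElem?_eq_none hlen]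
          rw [h1, hget]
          simp [bsum]
      | cons d rest =>
          have hhead : ds[i]? = some d := by
            rw [← List.head?_drop, hd]; rfl
          have hget : PySem.List.pyGetD ds (i : Int) 0 = d := by
            simp [PySem.List.pyGetD_natCast, List.getD_eq_getElem?_getD, hhead]
          have h1 : ds.drop (i + 1) = rest := by
            rw [← List.tail_drop, hd]; rfl
          rw [h1, hget]
          simp only [List.zip_cons_cons, bsum]
          split_ifs <;> ring

theorem sweepInner_eq (p cur : Int) (ds as : List Int) :
    (sweepInner p ds as cur).1 = bsum p cur (ds.zip as) := by
  have h := inner_aux p cur ds as 0 0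
  simpa [sweepInner] using h

theorem nb_bounds (p : Int) (hp : 0 < p) :
    ((-(PySem.Int.floordiv (-360) p)) - 1) * p < 360 ∧ 360 ≤ (-(PySem.Int.floordiv (-360) p)) * p :=
  (PySem.Int.neg_floordiv_neg_eq_iff_of_pos hp).mp rfl

theorem nb_pos (p : Int) (hp : 0 < p) : 0 < -(PySem.Int.floordiv (-360) p) := by
  rcases nb_bounds p hp with ⟨h1, h2⟩
  by_contra h
  push_neg at h
  nlinarith

theorem lt360_iff (p : Int) (hp : 0 < p) (j : Int) (hj : 0 ≤ j) :
    p * j < 360 ↔ j < -(PySem.Int.floordiv (-360) p) := by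
  rcases nb_bounds p hp with ⟨h1, h2⟩
  constructor
  · intro h
    by_contra hle
    push_neg at hle
    nlinarith
  · intro h
    nlinarith

theorem loop_eq (p : Int) (hp : 0 < p) (ds as : List Int) :
    ∀ (m : Nat) (j : Nat), ((j : Int) + (m : Int) = -(PySem.Int.floordiv (-360) p)) →
      ∀ (tds sas : List Int),
      sweepLoop p ds as (p * (j : Int)) tds sas =
        (tds ++ (List.range m).map (fun (k : Nat) => bsum p (p * ((j : Int) + (k : Int))) (ds.zip as)),
         sas ++ (List.range m).map (fun (k : Nat) => p * ((j : Int) + (k : Int)) + p))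
  | 0, j, hm, tds, sas => by
      have : ¬ p * (j : Int) < 360 := by
        rw [lt360_iff p hp _ (by positivity)]
        omega
      rw [sweepLoop]
      simp [this]
  | (m + 1), j, hm, tds, sas => by
      have hlt : p * (j : Int) < 360 := by
        rw [lt360_iff p hp _ (by positivity)]
        push_cast at hm ⊢
        omega
      rw [sweepLoop, dif_pos ⟨hp, hlt⟩]
      have hc : p * (j : Int) + p = p * ((j + 1 : Nat) : Int) := by push_cast; ring
      rw [hc, loop_eq p hp ds as m (j + 1) (by push_cast at hm ⊢; omega)]
      rw [sweepInner_eq]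
      refine congrArg₂ Prod.mk ?_ ?_
      · rw [List.append_assoc, List.singleton_append]
        refine congrArg (tds ++ ·) ?_
        rw [List.range_succ_eq_map, List.map_cons, List.map_map]
        refine congrArg₂ List.cons (by push_cast; ring_nf) ?_
        refine List.map_congr_left fun k _ => ?_
        simp only [Function.comp_apply]
        push_cast; ring_nf
      · rw [List.append_assoc, List.singleton_append]
        refine congrArg (sas ++ ·) ?_
        rw [List.range_succ_eq_map, List.map_cons, List.map_map]
        refine congrArg₂ List.cons (by push_cast; ring_nf) ?_
        refine List.map_congr_left fun k _ => ?_
        simp only [Function.comp_apply]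
        push_cast; ring_nf

def baccum (p nb b : Int) : List (Int × Int) → Int
  | [] => 0
  | (d, a) :: t =>
      (if 0 ≤ a ∧ PySem.Int.floordiv a p = b ∧ PySem.Int.floordiv a p < nb then d else 0) +
        baccum p nb b t

theorem floordiv_nonneg' (p a : Int) (hp : 0 < p) (ha : 0 ≤ a) :
    0 ≤ PySem.Int.floordiv a p := by
  have h := (PySem.Int.floordiv_eq_iff_of_pos hp).mp (rfl : PySem.Int.floordiv a p = _)
  by_contra hneg
  push_neg at hneg
  rcases h with ⟨h1, h2⟩
  nlinarith

theorem set_map_range (N : Nat) (g : Nat → Int) (b0 : Nat) (hb : b0 < N) (v : Int) :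
    ((List.range N).map g).set b0 v = (List.range N).map (fun b => if b = b0 then v else g b) := by
  apply List.ext_getElem
  · simp
  · intro i h1 h2
    simp only [List.getElem_set, List.getElem_map, List.getElem_range]
    simp only [List.length_set, List.length_map, List.length_range] at h1
    split_ifs with hh1 hh2 hh2 <;> first | rfl | omega

theorem altFold_cons (p nb d a : Int) (t : List (Int × Int)) (s : List Int) :
    altFold p nb ((d, a) :: t) s =
      altFold p nb t
        (if 0 ≤ a then
           if PySem.Int.floordiv a p < nb then
             PySem.List.pySetD s (PySem.Int.floordiv a p)
               (PySem.List.pyGetD s (PySem.Int.floordiv a p) 0 + d)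
           else s
         else s) := rfl

theorem foldB_map (p nb : Int) (hp : 0 < p) :
    ∀ (pairs : List (Int × Int)) (g : Nat → Int),
      altFold p nb pairs ((List.range nb.toNat).map g) =
        (List.range nb.toNat).map (fun b => g b + baccum p nb (b : Int) pairs)
  | [], g => by simp [altFold, baccum]
  | (d, a) :: t, g => by
      rw [altFold_cons]
      by_cases h0 : 0 ≤ a
      · by_cases h1 : PySem.Int.floordiv a p < nb
        · have hb0 : 0 ≤ PySem.Int.floordiv a p := floordiv_nonneg' p a hp h0
          obtain ⟨b0, hb0eq⟩ : ∃ b0 : Nat, PySem.Int.floordiv a p = (b0 : Int) :=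
            ⟨(PySem.Int.floordiv a p).toNat, by omega⟩
          rw [hb0eq] at h1 ⊢
          have hbN : b0 < nb.toNat := by omega
          have hget : PySem.List.pyGetD ((List.range nb.toNat).map g) ((b0 : Nat) : Int) 0
              = g b0 := by
            rw [PySem.List.pyGetD_natCast]
            simp [List.getD_eq_getElem?_getD, hbN]
          have hset : PySem.List.pySetD ((List.range nb.toNat).map g) ((b0 : Nat) : Int)
                (g b0 + d)
              = (List.range nb.toNat).map (fun b => if b = b0 then g b0 + d else g b) := by
            rw [PySem.List.pySetD_natCast]
            exact set_map_range _ _ _ hbN _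
          rw [if_pos h0, if_pos h1, hget, hset, foldB_map p nb hp t]
          refine List.map_congr_left fun b hb => ?_
          simp only [List.mem_range] at hb
          by_cases hbb : b = b0
          · subst hbb
            simp only [if_pos rfl, baccum, hb0eq]
            simp only [h0, h1, true_and, and_true, and_self, if_true]
            ring
          · simp only [if_neg hbb, baccum, hb0eq]
            rw [if_neg (by rintro ⟨-, h, -⟩; exact hbb (by exact_mod_cast h.symm))]
            ring
        · rw [if_pos h0, if_neg h1, foldB_map p nb hp t]
          refine List.map_congr_left fun b hb => ?_
          simp only [baccum]
          rw [if_neg (by rintro ⟨-, -, h⟩; exact h1 h)]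
          ring
      · rw [if_neg h0, foldB_map p nb hp t]
        refine List.map_congr_left fun b hb => ?_
        simp only [baccum]
        rw [if_neg (by rintro ⟨h, -, -⟩; exact h0 h)]
        ring

theorem baccum_eq_bsum (p nb : Int) (hp : 0 < p) (b : Nat) (hb : (b : Int) < nb) :
    ∀ l : List (Int × Int), baccum p nb (b : Int) l = bsum p (p * (b : Int)) l
  | [] => rfl
  | (d, a) :: t => by
      simp only [baccum, bsum]
      rw [baccum_eq_bsum p nb hp b hb t]
      congr 1
      by_cases hc : p * (b : Int) ≤ a ∧ a < p * (b : Int) + p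
      · rw [if_pos hc]
        have h0 : 0 ≤ a := le_trans (by positivity) hc.1
        have hfd : PySem.Int.floordiv a p = (b : Int) := by
          rw [PySem.Int.floordiv_eq_iff_of_pos hp]
          constructor <;> nlinarith [hc.1, hc.2]
        rw [if_pos ⟨h0, hfd, by omega⟩]
      · rw [if_neg hc]
        rw [if_neg]
        rintro ⟨h0, hfd, -⟩
        have := (PySem.Int.floordiv_eq_iff_of_pos hp).mp hfd
        exact hc ⟨by nlinarith [this.1], by nlinarith [this.2]⟩

theorem main_eq (p : Int) (ds as : List Int) (hp : 0 < p) :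
    sweep_angles p ds as = sweep_angles_alt p ds as := by
  have hnb0 : 0 < -(PySem.Int.floordiv (-360) p) := nb_pos p hp
  have hN : (((-(PySem.Int.floordiv (-360) p)).toNat : Nat) : Int) = -(PySem.Int.floordiv (-360) p) := by
    omega
  have hA := loop_eq p hp ds as (-(PySem.Int.floordiv (-360) p)).toNat 0 (by push_cast; omega) [] []
  have hzero : p * ((0 : Nat) : Int) = 0 := by simp
  rw [hzero] at hA
  have hrep : (List.replicate (-(PySem.Int.floordiv (-360) p)).toNat (0 : Int))
      = (List.range (-(PySem.Int.floordiv (-360) p)).toNat).map (fun _ => (0 : Int)) := by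
    simp [List.map_const']
  rw [sweep_angles, hA, sweep_angles_alt]
  refine congrArg₂ Prod.mk ?_ ?_
  · rw [hrep, foldB_map p _ hp]
    rw [List.nil_append]
    refine List.map_congr_left fun b hb => ?_
    simp only [List.mem_range] at hb
    rw [zero_add, baccum_eq_bsum p _ hp b (by omega)]
    push_cast
    ring_nf
  · rw [List.nil_append]
    refine List.map_congr_left fun k _ => ?_
    push_cast
    ring

-- ===== VERDICT (by name: the statement is the Claim_ definition above) =====
theorem sweep_angles_spec : Claim_equal_sweep_angles := by
  intro p ds as _ hpre
  unfold Spec_sweep_angles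
  exact main_eq p ds as hpre.1
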